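-- pv_equiv track=rewrite | github.com/teobsn/movfuscator | src/parser.py | format_dataline
-- ===== SOURCE A (Python) =====
-- def format_dataline(line):
--     line = line.split("#")[0].split(";")[0].strip()
--     if not line:
--         return None
--
--     parts = line.split(None, 1)
--     if len(parts) != 2:
--         return None
--
--     label, rest = parts
--     directive_and_values = rest.strip().split(None, 1)
--     if len(directive_and_values) != 2:
--         return None
--
--     directive, values = directive_and_values
--     values_list = [value.strip() for value in values.split(",")]
--
--     return [label[:-1], directive, values_list]
-- ===== SOURCE B (Python) =====
-- def format_dataline(line):
--     # Single left-to-right index scan over the comment-free, stripped line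
--     # instead of A's cascade of split(None, 1) calls.
--     s = line.split("#")[0].split(";")[0].strip()
--     n = len(s)
--     i = 0
--     while i < n and not s[i].isspace():
--         i += 1
--     label = s[:i]
--     while i < n and s[i].isspace():
--         i += 1
--     j = i
--     while i < n and not s[i].isspace():
--         i += 1
--     directive = s[j:i]
--     while i < n and s[i].isspace():
--         i += 1
--     if not label or not directive or i >= n:
--         return None
--     return [label[:-1], directive, [v.strip() for v in s[i:].split(",")]]
-- ===== Notes on version B (the rewrite author's own statement) =====
-- stated objective: alternative
-- what changed: Replaces A's cascade of split(None,1)/strip stages with a single explicit index scan over the stripped line (state-machine style: token, gap, token, gap, remainder).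
import Mathlib
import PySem

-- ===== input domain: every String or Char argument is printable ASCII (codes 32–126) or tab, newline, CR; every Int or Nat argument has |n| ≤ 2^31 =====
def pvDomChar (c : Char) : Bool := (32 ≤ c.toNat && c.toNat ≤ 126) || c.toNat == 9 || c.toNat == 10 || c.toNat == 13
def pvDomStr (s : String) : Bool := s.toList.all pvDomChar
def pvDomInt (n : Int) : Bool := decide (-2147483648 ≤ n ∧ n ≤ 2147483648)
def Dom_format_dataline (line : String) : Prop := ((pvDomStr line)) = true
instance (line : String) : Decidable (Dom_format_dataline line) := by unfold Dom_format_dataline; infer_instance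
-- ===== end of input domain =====

-- B replaces A's cascade of split(None,1)/strip stages with one explicit index scan (alternative decomposition, same cost).

-- ===== PORT A =====
def format_dataline (line : String) : Option (String × String × List String) :=
  -- line = line.split("#")[0].split(";")[0].strip()
  let l := PySem.Chars.strip ((PySem.Chars.splitOn ((PySem.Chars.splitOn line.toList ['#']).headD []) [';']).headD [])
  if l = [] then none
  else
    -- parts = line.split(None, 1); if len(parts) != 2: return None
    match PySem.Chars.split₀Max l 1 with
    | [label, rest] =>
      -- directive_and_values = rest.strip().split(None, 1); if len != 2: return None
      match PySem.Chars.split₀Max (PySem.Chars.strip rest) 1 with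
      | [directive, values] =>
        some (String.ofList (PySem.List.slice label none (some (-1))),
              String.ofList directive,
              (PySem.Chars.splitOn values [',']).map (fun v => String.ofList (PySem.Chars.strip v)))
      | _ => none
    | _ => none

-- ===== PORT B =====
-- 'while i < n and p(s[i]): i += 1' ported as this index recursion
def pvAdvance (s : List Char) (p : Char → Bool) (i : Nat) : Nat :=
  if h : i < s.length then
    if p s[i] then pvAdvance s p (i + 1) else i
  else i
termination_by s.length - i

def format_dataline_alt (line : String) : Option (String × String × List String) :=
  -- s = line.split("#")[0].split(";")[0].strip()
  let s := PySem.Chars.strip ((PySem.Chars.splitOn ((PySem.Chars.splitOn line.toList ['#']).headD []) [';']).headD [])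
  let n := s.length
  let i1 := pvAdvance s (fun c => !PySem.Chars.isspace c) 0
  let label := s.take i1                  -- s[:i]
  let i2 := pvAdvance s PySem.Chars.isspace i1
  let i3 := pvAdvance s (fun c => !PySem.Chars.isspace c) i2
  let directive := (s.drop i2).take (i3 - i2)   -- s[j:i]
  let i4 := pvAdvance s PySem.Chars.isspace i3
  if label = [] ∨ directive = [] ∨ n ≤ i4 then none
  else
    some (String.ofList (PySem.List.slice label none (some (-1))),
          String.ofList directive,
          (PySem.Chars.splitOn (s.drop i4) [',']).map (fun v => String.ofList (PySem.Chars.strip v)))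

-- ===== PRECONDITION & SPEC =====
def Spec_format_dataline (line : String) (out : Option (String × String × List String)) : Prop := out = format_dataline_alt line
instance (line : String) (out : Option (String × String × List String)) : Decidable (Spec_format_dataline line out) := by unfold Spec_format_dataline; infer_instance

-- ===== CLAIM (what is proved, stated in full; the proofs are below) =====
def Claim_equal_format_dataline : Prop := ∀ (line : String), Dom_format_dataline line → Spec_format_dataline line (format_dataline line)

-- ===== LEMMAS AND PROOFS =====

lemma pv_take_takeWhile {α : Type} (p : α → Bool) (l : List α) :
    l.take (l.takeWhile p).length = l.takeWhile p := by
  induction l with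
  | nil => rfl
  | cons a l ih =>
    by_cases h : p a = true
    · simp [h, ih]
    · simp [h]

lemma pv_drop_takeWhile {α : Type} (p : α → Bool) (l : List α) :
    l.drop (l.takeWhile p).length = l.dropWhile p := by
  induction l with
  | nil => rfl
  | cons a l ih =>
    by_cases h : p a = true
    · simp [h, ih]
    · simp [h]

lemma pvAdvance_spec (s : List Char) (p : Char → Bool) (i : Nat) :
    pvAdvance s p i = i + ((s.drop i).takeWhile p).length := by
  fun_induction pvAdvance s p i with
  | case1 i h hp ih =>
    rw [ih, List.drop_eq_getElem_cons h, List.takeWhile_cons_of_pos hp]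
    simp; omega
  | case2 i h hp =>
    rw [List.drop_eq_getElem_cons h, List.takeWhile_cons_of_neg hp]
    simp
  | case3 i h =>
    rw [List.drop_eq_nil_iff.mpr (by omega)]
    simp

-- dropWhile is idempotent
lemma pv_noLead_dropWhile (p : Char → Bool) (l : List Char) :
    (l.dropWhile p).dropWhile p = l.dropWhile p := by
  rw [List.dropWhile_eq_self_iff]
  intro hl
  have hne : l.dropWhile p ≠ [] := by
    intro h; rw [h] at hl; simp at hl
  have := List.head_dropWhile_not p hne
  rw [List.head_eq_getElem] at this
  simp [this]

lemma pv_noLead_of_prefix (p : Char → Bool) (r t : List Char) (hpre : r <+: t)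
    (ht : t.dropWhile p = t) : r.dropWhile p = r := by
  rw [List.dropWhile_eq_self_iff] at ht ⊢
  rcases hpre with ⟨u, rfl⟩
  intro hr
  have h0 : (0 : Nat) < (r ++ u).length := by simp; omega
  have := ht h0
  rwa [List.getElem_append_left hr] at this

lemma pv_noTrail_of_suffix (p : Char → Bool) (r t : List Char) (hsuf : r <:+ t)
    (ht : t.reverse.dropWhile p = t.reverse) : r.reverse.dropWhile p = r.reverse := by
  exact pv_noLead_of_prefix p r.reverse t.reverse (List.reverse_prefix.mpr hsuf) ht

lemma pv_strip_noLead (x : List Char) :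
    (PySem.Chars.strip x).dropWhile PySem.Chars.isspace = PySem.Chars.strip x := by
  unfold PySem.Chars.strip PySem.Chars.rstrip PySem.Chars.lstrip
  apply pv_noLead_of_prefix _ _ (List.dropWhile PySem.Chars.isspace x)
  · have := List.dropWhile_suffix (l := (List.dropWhile PySem.Chars.isspace x).reverse) PySem.Chars.isspace
    have h2 := List.reverse_prefix.mpr this
    rwa [List.reverse_reverse] at h2
  · exact pv_noLead_dropWhile _ _

lemma pv_strip_noTrail (x : List Char) :
    (PySem.Chars.strip x).reverse.dropWhile PySem.Chars.isspace = (PySem.Chars.strip x).reverse := by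
  unfold PySem.Chars.strip PySem.Chars.rstrip PySem.Chars.lstrip
  rw [List.reverse_reverse]
  exact pv_noLead_dropWhile _ _

lemma pv_strip_eq_self (l : List Char)
    (h1 : l.dropWhile PySem.Chars.isspace = l)
    (h2 : l.reverse.dropWhile PySem.Chars.isspace = l.reverse) :
    PySem.Chars.strip l = l := by
  unfold PySem.Chars.strip PySem.Chars.rstrip PySem.Chars.lstrip
  rw [h1, h2, List.reverse_reverse]

-- split(None, 1) on a string with no leading whitespace
lemma pv_split01 (t : List Char) (h1 : t.dropWhile PySem.Chars.isspace = t) (hne : t ≠ []) :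
    PySem.Chars.split₀Max t 1 =
      (let w1 := t.takeWhile (fun c => !PySem.Chars.isspace c)
       let r := (t.dropWhile (fun c => !PySem.Chars.isspace c)).dropWhile PySem.Chars.isspace
       if r = [] then [w1] else [w1, r]) := by
  obtain ⟨c, cs, rfl⟩ := List.exists_cons_of_ne_nil hne
  unfold PySem.Chars.split₀Max
  norm_num
  rw [PySem.Chars.split₀Max.go, h1]
  simp only []
  rw [PySem.Chars.split₀Max.go]
  rcases h2 : List.dropWhile PySem.Chars.isspace (List.dropWhile (fun c => !PySem.Chars.isspace c) (c :: cs)) with _ | ⟨d, ds⟩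
  · simp only [List.dropWhile_eq_nil_iff] at h2
    rw [if_pos h2]
    simp
  · have h3 : ¬ ∀ x ∈ List.dropWhile (fun c => !PySem.Chars.isspace c) (c :: cs), PySem.Chars.isspace x = true := by
      intro hall
      rw [← List.dropWhile_eq_nil_iff (p := PySem.Chars.isspace)] at hall
      simp [hall] at h2
    simp [h3]

lemma pv_takeWhile_ne_nil (t : List Char) (h1 : t.dropWhile PySem.Chars.isspace = t) (hne : t ≠ []) :
    t.takeWhile (fun c => !PySem.Chars.isspace c) ≠ [] := by
  obtain ⟨c, cs, rfl⟩ := List.exists_cons_of_ne_nil hne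
  rw [List.dropWhile_eq_self_iff] at h1
  have := h1 (by simp)
  simp at this
  simp [this]

lemma pv_master (t : List Char)
    (hL : t.dropWhile PySem.Chars.isspace = t)
    (hR : t.reverse.dropWhile PySem.Chars.isspace = t.reverse) :
    (if t = [] then none
     else
       match PySem.Chars.split₀Max t 1 with
       | [label, rest] =>
         match PySem.Chars.split₀Max (PySem.Chars.strip rest) 1 with
         | [directive, values] =>
           some (String.ofList (PySem.List.slice label none (some (-1))),
                 String.ofList directive,
                 (PySem.Chars.splitOn values [',']).map (fun v => String.ofList (PySem.Chars.strip v)))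
         | _ => none
       | _ => none) =
    (let n := t.length
     let i1 := pvAdvance t (fun c => !PySem.Chars.isspace c) 0
     let label := t.take i1
     let i2 := pvAdvance t PySem.Chars.isspace i1
     let i3 := pvAdvance t (fun c => !PySem.Chars.isspace c) i2
     let directive := (t.drop i2).take (i3 - i2)
     let i4 := pvAdvance t PySem.Chars.isspace i3
     if label = [] ∨ directive = [] ∨ n ≤ i4 then none
     else
       some (String.ofList (PySem.List.slice label none (some (-1))),
             String.ofList directive,
             (PySem.Chars.splitOn (t.drop i4) [',']).map (fun v => String.ofList (PySem.Chars.strip v)))) := by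
  by_cases ht : t = []
  · subst ht; simp [pvAdvance_spec]
  · rw [if_neg ht, pv_split01 t hL ht]
    simp only []
    have hA0 : pvAdvance t (fun c => !PySem.Chars.isspace c) 0 =
        (t.takeWhile (fun c => !PySem.Chars.isspace c)).length := by
      rw [pvAdvance_spec]; simp
    have hdrop1 : t.drop (pvAdvance t (fun c => !PySem.Chars.isspace c) 0) =
        t.dropWhile (fun c => !PySem.Chars.isspace c) := by
      rw [hA0, pv_drop_takeWhile]
    have hA1 : pvAdvance t PySem.Chars.isspace (pvAdvance t (fun c => !PySem.Chars.isspace c) 0) =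
        pvAdvance t (fun c => !PySem.Chars.isspace c) 0 +
          ((t.dropWhile (fun c => !PySem.Chars.isspace c)).takeWhile PySem.Chars.isspace).length := by
      rw [pvAdvance_spec, hdrop1]
    have hdrop2 : t.drop (pvAdvance t PySem.Chars.isspace (pvAdvance t (fun c => !PySem.Chars.isspace c) 0)) =
        (t.dropWhile (fun c => !PySem.Chars.isspace c)).dropWhile PySem.Chars.isspace := by
      rw [hA1, ← List.drop_drop, hdrop1, pv_drop_takeWhile]
    have hA2 : pvAdvance t (fun c => !PySem.Chars.isspace c)
          (pvAdvance t PySem.Chars.isspace (pvAdvance t (fun c => !PySem.Chars.isspace c) 0)) =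
        pvAdvance t PySem.Chars.isspace (pvAdvance t (fun c => !PySem.Chars.isspace c) 0) +
          (((t.dropWhile (fun c => !PySem.Chars.isspace c)).dropWhile PySem.Chars.isspace).takeWhile
            (fun c => !PySem.Chars.isspace c)).length := by
      rw [pvAdvance_spec, hdrop2]
    have hdrop3 : t.drop (pvAdvance t (fun c => !PySem.Chars.isspace c)
          (pvAdvance t PySem.Chars.isspace (pvAdvance t (fun c => !PySem.Chars.isspace c) 0))) =
        ((t.dropWhile (fun c => !PySem.Chars.isspace c)).dropWhile PySem.Chars.isspace).dropWhile
          (fun c => !PySem.Chars.isspace c) := by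
      rw [hA2, ← List.drop_drop, hdrop2, pv_drop_takeWhile]
    have hA3 : pvAdvance t PySem.Chars.isspace (pvAdvance t (fun c => !PySem.Chars.isspace c)
          (pvAdvance t PySem.Chars.isspace (pvAdvance t (fun c => !PySem.Chars.isspace c) 0))) =
        pvAdvance t (fun c => !PySem.Chars.isspace c)
          (pvAdvance t PySem.Chars.isspace (pvAdvance t (fun c => !PySem.Chars.isspace c) 0)) +
          ((((t.dropWhile (fun c => !PySem.Chars.isspace c)).dropWhile PySem.Chars.isspace).dropWhile
            (fun c => !PySem.Chars.isspace c)).takeWhile PySem.Chars.isspace).length := by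
      rw [pvAdvance_spec, hdrop3]
    have hdrop4 : t.drop (pvAdvance t PySem.Chars.isspace (pvAdvance t (fun c => !PySem.Chars.isspace c)
          (pvAdvance t PySem.Chars.isspace (pvAdvance t (fun c => !PySem.Chars.isspace c) 0)))) =
        (((t.dropWhile (fun c => !PySem.Chars.isspace c)).dropWhile PySem.Chars.isspace).dropWhile
          (fun c => !PySem.Chars.isspace c)).dropWhile PySem.Chars.isspace := by
      rw [hA3, ← List.drop_drop, hdrop3, pv_drop_takeWhile]
    have hlabel : t.take (pvAdvance t (fun c => !PySem.Chars.isspace c) 0) =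
        t.takeWhile (fun c => !PySem.Chars.isspace c) := by
      rw [hA0, pv_take_takeWhile]
    have hdir : (t.drop (pvAdvance t PySem.Chars.isspace (pvAdvance t (fun c => !PySem.Chars.isspace c) 0))).take
          (pvAdvance t (fun c => !PySem.Chars.isspace c)
            (pvAdvance t PySem.Chars.isspace (pvAdvance t (fun c => !PySem.Chars.isspace c) 0)) -
           pvAdvance t PySem.Chars.isspace (pvAdvance t (fun c => !PySem.Chars.isspace c) 0)) =
        ((t.dropWhile (fun c => !PySem.Chars.isspace c)).dropWhile PySem.Chars.isspace).takeWhile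
          (fun c => !PySem.Chars.isspace c) := by
      rw [hA2, Nat.add_sub_cancel_left, hdrop2, pv_take_takeWhile]
    have hw1 : t.takeWhile (fun c => !PySem.Chars.isspace c) ≠ [] := pv_takeWhile_ne_nil t hL ht
    rw [hlabel, hdir, hdrop4]
    by_cases hrnil : (t.dropWhile (fun c => !PySem.Chars.isspace c)).dropWhile PySem.Chars.isspace = []
    · -- no second token: both sides are none
      rw [if_pos hrnil, hrnil]
      simp
    · rw [if_neg hrnil]
      simp only []
      -- LHS: match [w1, r]; strip r = r
      have hsuf : (t.dropWhile (fun c => !PySem.Chars.isspace c)).dropWhile PySem.Chars.isspace <:+ t :=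
        (List.dropWhile_suffix _).trans (List.dropWhile_suffix _)
      have hLr : ((t.dropWhile (fun c => !PySem.Chars.isspace c)).dropWhile PySem.Chars.isspace).dropWhile
          PySem.Chars.isspace = (t.dropWhile (fun c => !PySem.Chars.isspace c)).dropWhile PySem.Chars.isspace :=
        pv_noLead_dropWhile _ _
      have hstrip : PySem.Chars.strip ((t.dropWhile (fun c => !PySem.Chars.isspace c)).dropWhile PySem.Chars.isspace) =
          (t.dropWhile (fun c => !PySem.Chars.isspace c)).dropWhile PySem.Chars.isspace :=
        pv_strip_eq_self _ hLr (pv_noTrail_of_suffix _ _ _ hsuf hR)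
      rw [hstrip, pv_split01 _ hLr hrnil]
      simp only []
      have hw2 : ((t.dropWhile (fun c => !PySem.Chars.isspace c)).dropWhile PySem.Chars.isspace).takeWhile
          (fun c => !PySem.Chars.isspace c) ≠ [] := pv_takeWhile_ne_nil _ hLr hrnil
      by_cases hr2nil : (((t.dropWhile (fun c => !PySem.Chars.isspace c)).dropWhile PySem.Chars.isspace).dropWhile
          (fun c => !PySem.Chars.isspace c)).dropWhile PySem.Chars.isspace = []
      · -- no third part: both sides are none
        rw [if_pos hr2nil, hr2nil]
        have : t.length ≤ pvAdvance t PySem.Chars.isspace (pvAdvance t (fun c => !PySem.Chars.isspace c)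
            (pvAdvance t PySem.Chars.isspace (pvAdvance t (fun c => !PySem.Chars.isspace c) 0))) := by
          rw [← List.drop_eq_nil_iff, hdrop4, hr2nil]
        simp [this]
      · -- all three parts present: both sides return the same triple
        rw [if_neg hr2nil]
        have hlen : ¬ t.length ≤ pvAdvance t PySem.Chars.isspace (pvAdvance t (fun c => !PySem.Chars.isspace c)
            (pvAdvance t PySem.Chars.isspace (pvAdvance t (fun c => !PySem.Chars.isspace c) 0))) := by
          intro h
          rw [← List.drop_eq_nil_iff, hdrop4] at h
          exact hr2nil h
        rw [if_neg (by push Not; exact ⟨hw1, hw2, by omega⟩)]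

-- ===== VERDICT (by name: the statement is the Claim_ definition above) =====
theorem format_dataline_spec : Claim_equal_format_dataline := by
  intro line _
  unfold Spec_format_dataline format_dataline format_dataline_alt
  exact pv_master _ (pv_strip_noLead _) (pv_strip_noTrail _)
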